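-- pv_equiv track=rewrite | github.com/cyan-wolf/competitive_programming | matcomgrader/icpc_caribbean_qualifiers_2024/warmup_2/problem_e.py | det_first_last_good_numbers
-- ===== SOURCE A (Python) =====
-- import math
--
-- def get_sum_divs(num):
--     sum_divs = 0
--     divs = set()
--
--     for i in range(2, int(math.sqrt(num) + 1)):
--         if num % i == 0:
--             compl = num // i
--
--             if i not in divs:
--                 sum_divs += i
--                 divs.add(i)
--
--             if compl not in divs:
--                 sum_divs += compl
--                 divs.add(compl)
--
--     return sum_divs
--
-- def det_first_last_good_numbers(low, high):
--     first_last = [-1, -1]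
--
--     # From below.
--     for num in range(low, high + 1):
--         if get_sum_divs(num) > num:
--             first_last[0] = num
--             break
--
--     # If no good numbers were found, give up early.
--     if first_last[0] != -1:
--         # From above.
--         for num in range(high, low - 1, -1):
--             if get_sum_divs(num) > num:
--                 first_last[1] = num
--                 break
--
--     return [str(d) for d in first_last]
-- ===== SOURCE B (Python) =====
-- def _sigma(n):
--     # sum of ALL divisors of n (n >= 1), via prime factorisation and the
--     # multiplicative closed form sigma(n) = prod over p^k || n of (1+p+...+p^k)
--     total = 1
--     m = n
--     p = 2
--     while p * p <= m:
--         if m % p == 0: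
--             term = 1
--             while m % p == 0:
--                 m //= p
--                 term = term * p + 1
--             total *= term
--         p += 1
--     if m > 1:
--         total *= m + 1
--     return total
--
-- def _good(n):
--     # sum of divisors strictly between 1 and n exceeds n
--     return n >= 1 and _sigma(n) - n - 1 > n
--
-- def det_first_last_good_numbers(low, high):
--     first = next((n for n in range(low, high + 1) if _good(n)), None)
--     if first is None:
--         return ["-1", "-1"]
--     last = next((n for n in range(high, low - 1, -1) if _good(n)), first)
--     return [str(first), str(last)]
-- ===== Notes on version B (the rewrite author's own statement) =====
-- stated objective: alternative
-- what changed: The divisor enumeration of get_sum_divs disappears entirely: B factorises each number by trial division and evaluates the multiplicative closed form sigma(n) = prod(1+p+...+p^k) over the prime factorisation, testing sigma(n)-n-1 > n, and the sentinel-list/break scans become find-first generator expressions with an early return.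
import Mathlib
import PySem

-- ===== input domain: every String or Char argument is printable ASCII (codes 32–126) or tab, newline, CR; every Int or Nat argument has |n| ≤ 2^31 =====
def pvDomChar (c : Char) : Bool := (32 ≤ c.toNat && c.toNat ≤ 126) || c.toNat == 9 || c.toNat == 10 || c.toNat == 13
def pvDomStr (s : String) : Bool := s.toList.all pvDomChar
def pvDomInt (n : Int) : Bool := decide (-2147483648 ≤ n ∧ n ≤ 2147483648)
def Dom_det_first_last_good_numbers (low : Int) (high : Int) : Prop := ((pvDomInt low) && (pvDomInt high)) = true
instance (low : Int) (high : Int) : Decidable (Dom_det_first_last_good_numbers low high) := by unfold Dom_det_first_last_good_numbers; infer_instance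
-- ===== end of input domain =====

-- B replaces A's divisor enumeration entirely: it factorises each number and uses the
-- multiplicative closed form sigma(n) = prod (1+p+...+p^k), testing sigma(n)-n-1 > n, and
-- replaces the sentinel-list/break scans with find-first expressions and an early return.

-- ===== PORT A =====
-- the body of A's `for i in range(...)` loop in get_sum_divs, on state (sum_divs, divs)
def pvStep (num : Int) (st : Int × PySem.Set Int) (i : Int) : Int × PySem.Set Int :=
  if PySem.Int.mod num i = 0 then
    let compl := PySem.Int.floordiv num i
    let st1 := if PySem.Set.contains st.2 i then st else (st.1 + i, PySem.Set.add st.2 i)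
    if PySem.Set.contains st1.2 compl then st1 else (st1.1 + compl, PySem.Set.add st1.2 compl)
  else st

-- get_sum_divs: the loop bound int(math.sqrt(num) + 1) is ported as Nat.sqrt num.toNat + 1,
-- exact for 0 ≤ num ≤ 2^31 (double sqrt is correctly rounded and never crosses an integer
-- there); for num < 0 Python raises ValueError — those inputs are outside Pre_ below.
def pvGetSumDivs (num : Int) : Int :=
  ((PySem.List.pyRange 2 (((Int.toNat num).sqrt : Int) + 1) 1).foldl (pvStep num) (0, PySem.Set.empty)).1

def det_first_last_good_numbers (low : Int) (high : Int) : List String :=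
  -- first_last = [-1, -1]; first early-breaking scan from below
  let fl0 : Int :=
    match (PySem.List.pyRange low (high + 1) 1).find? (fun num => decide (pvGetSumDivs num > num)) with
    | some num => num
    | none => -1
  -- if first_last[0] != -1: early-breaking scan from above
  let fl1 : Int :=
    if fl0 != -1 then
      match (PySem.List.pyRange high (low - 1) (-1)).find? (fun num => decide (pvGetSumDivs num > num)) with
      | some num => num
      | none => -1
    else -1
  [PySem.Int.toStr fl0, PySem.Int.toStr fl1]

-- ===== PORT B =====
-- the inner `while m % p == 0: m //= p; term = term * p + 1` of _sigma, over Nat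
-- (the guards 2 <= p, 1 <= m only make the recursion total; they hold wherever _sigma loops)
def pvStrip (p m term : Nat) : Nat × Nat :=
  if h : 2 ≤ p ∧ m % p = 0 ∧ 1 ≤ m then pvStrip p (m / p) (term * p + 1) else (m, term)
termination_by m
decreasing_by exact Nat.div_lt_self h.2.2 (by omega)

-- needed by pvSigLoop's termination proof
theorem pvStrip_fst_le (p m term : Nat) : (pvStrip p m term).1 ≤ m := by
  refine pvStrip.induct p (fun m term => (pvStrip p m term).1 ≤ m) ?_ ?_ m term
  · intro m term h ih
    rw [pvStrip, dif_pos h]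
    exact le_trans ih (Nat.div_le_self m p)
  · intro m term h
    rw [pvStrip, dif_neg h]

-- the outer `while p * p <= m` of _sigma plus the trailing `if m > 1`, over Nat
def pvSigLoop (m p total : Nat) : Nat :=
  if hp : p * p ≤ m then
    if hd : m % p = 0 then
      let r := pvStrip p m 1
      pvSigLoop r.1 (p + 1) (total * r.2)
    else pvSigLoop m (p + 1) total
  else if 1 < m then total * (m + 1) else total
termination_by (m, m + 1 - p)
decreasing_by
  · by_cases h2 : 2 ≤ p
    · have hlt : (pvStrip p m 1).1 < m := by
        rw [pvStrip, dif_pos ⟨h2, hd, by nlinarith⟩]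
        exact lt_of_le_of_lt (pvStrip_fst_le _ _ _) (Nat.div_lt_self (by nlinarith) (by omega))
      exact Prod.Lex.left _ _ hlt
    · have hm : (pvStrip p m 1).1 = m := by rw [pvStrip, dif_neg (by omega)]
      rw [hm]
      have hpm : p ≤ m := by nlinarith
      exact Prod.Lex.right _ (by omega)
  · have hpm : p ≤ m := by nlinarith
    exact Prod.Lex.right _ (by omega)

-- _sigma(num): ported over Nat; exact for num >= 1, the only values _good passes to it
-- (for num <= 0 the `n >= 1 and ...` in _good short-circuits before _sigma is called)
def pvSigmaAlt (num : Int) : Int := ((pvSigLoop (Int.toNat num) 2 1 : Nat) : Int)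

def pvIsGood (num : Int) : Bool :=
  decide (num ≥ 1) && decide (pvSigmaAlt num - num - 1 > num)

def det_first_last_good_numbers_alt (low : Int) (high : Int) : List String :=
  match (PySem.List.pyRange low (high + 1) 1).find? pvIsGood with
  | none => ["-1", "-1"]
  | some first =>
    let last := ((PySem.List.pyRange high (low - 1) (-1)).find? pvIsGood).getD first
    [PySem.Int.toStr first, PySem.Int.toStr last]

-- ===== PRECONDITION & SPEC =====
-- Pre_ excludes exactly the inputs where A raises: if low < 0 and low ≤ high, the very first
-- call get_sum_divs(low) hits math.sqrt of a negative number (ValueError). A is total elsewhere.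
def Pre_det_first_last_good_numbers (low : Int) (high : Int) : Prop := 0 ≤ low ∨ high < low
instance (low : Int) (high : Int) : Decidable (Pre_det_first_last_good_numbers low high) := by
  unfold Pre_det_first_last_good_numbers; infer_instance

def pvWitness_det_first_last_good_numbers : Int × Int := (10, 30)

def Spec_det_first_last_good_numbers (low : Int) (high : Int) (out : List String) : Prop := out = det_first_last_good_numbers_alt low high
instance (low : Int) (high : Int) (out : List String) : Decidable (Spec_det_first_last_good_numbers low high out) := by unfold Spec_det_first_last_good_numbers; infer_instance

-- ===== CLAIM (what is proved, stated in full; the proofs are below) =====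
def Claim_equal_det_first_last_good_numbers : Prop := ∀ (low : Int) (high : Int), Dom_det_first_last_good_numbers low high → Pre_det_first_last_good_numbers low high → Spec_det_first_last_good_numbers low high (det_first_last_good_numbers low high)

-- ===== LEMMAS AND PROOFS =====

-- find? only looks at its predicate on members of the list
theorem pvFind?_congr {α : Type} (l : List α) (p q : α → Bool) (h : ∀ x ∈ l, p x = q x) :
    l.find? p = l.find? q := by
  induction l with
  | nil => rfl
  | cons a t ih =>
    simp only [List.find?_cons]
    rw [h a (by simp)]
    cases q a
    · exact ih fun x hx => h x (by simp [hx])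
    · rfl

-- the Nat heart: divisors enumerated as {i, n/i} for i ≤ √n are exactly the divisors in [2, n)
theorem pvKeyNat (N : Nat) (h4 : 4 ≤ N) (d : Nat) :
    (∃ I, 2 ≤ I ∧ I ≤ N.sqrt ∧ I ∣ N ∧ (d = I ∨ d = N / I)) ↔ (2 ≤ d ∧ d < N ∧ d ∣ N) := by
  constructor
  · rintro ⟨I, h2, hs, hdvd, hd | hd⟩
    · subst hd
      have hII : d * d ≤ N := Nat.le_sqrt.mp hs
      exact ⟨h2, by nlinarith, hdvd⟩
    · have hII : I * I ≤ N := Nat.le_sqrt.mp hs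
      have hI0 : 0 < I := by omega
      subst hd
      refine ⟨Nat.le_div_iff_mul_le hI0 |>.mpr (by nlinarith), Nat.div_lt_self (by omega) (by omega), Nat.div_dvd_of_dvd hdvd⟩
  · rintro ⟨h2, hlt, hdvd⟩
    by_cases hds : d ≤ N.sqrt
    · exact ⟨d, h2, hds, hdvd, Or.inl rfl⟩
    · obtain ⟨m, hm⟩ := hdvd
      have hd0 : 0 < d := by omega
      have hm2 : 2 ≤ m := by nlinarith
      refine ⟨N / d, ?_, ?_, Nat.div_dvd_of_dvd ⟨m, hm⟩, Or.inr ?_⟩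
      · rw [hm, Nat.mul_div_cancel_left m hd0]; exact hm2
      · have hN : N < (N.sqrt + 1) * (N.sqrt + 1) := Nat.lt_succ_sqrt N
        have hlt2 : N / d < N.sqrt + 1 := by
          rw [Nat.div_lt_iff_lt_mul hd0]
          calc N < (N.sqrt + 1) * (N.sqrt + 1) := hN
            _ ≤ (N.sqrt + 1) * d := by apply Nat.mul_le_mul_left; omega
        omega
      · rw [Nat.div_div_self ⟨m, hm⟩ (by omega)]

-- one conditional "add to the set and the sum" step preserves nodup/sum and adds one member
theorem pvAddStep (s : PySem.Set Int) (acc : Int) (x : Int) (hnd : s.Nodup) (hsum : acc = s.sum) :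
    (if PySem.Set.contains s x then (acc, s) else (acc + x, PySem.Set.add s x)).2.Nodup ∧
    (if PySem.Set.contains s x then (acc, s) else (acc + x, PySem.Set.add s x)).1
      = (if PySem.Set.contains s x then (acc, s) else (acc + x, PySem.Set.add s x)).2.sum ∧
    ∀ d : Int, d ∈ (if PySem.Set.contains s x then (acc, s) else (acc + x, PySem.Set.add s x)).2 ↔ d ∈ s ∨ d = x := by
  by_cases h : PySem.Set.contains s x = true
  · have hx : x ∈ s := (PySem.Set.contains_iff s x).mp h
    simp only [h, if_true]
    refine ⟨hnd, hsum, fun d => ?_⟩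
    constructor
    · exact Or.inl
    · rintro (hd | rfl) <;> [exact hd; exact hx]
  · have hx : x ∉ s := fun hm => h ((PySem.Set.contains_iff s x).mpr hm)
    have hadd : PySem.Set.add s x = s ++ [x] := by
      simp [PySem.Set.add]; exact hx
    simp only [h, hadd]
    refine ⟨?_, ?_, fun d => ?_⟩
    · simp [List.nodup_append, hnd]
      exact fun a ha e => hx (e ▸ ha)
    · simp [List.sum_append, hsum]
    · simp

-- the invariant carried by A's fold: (accumulated sum, set of found divisors)
def pvInv (n k : Int) (st : Int × PySem.Set Int) : Prop :=
  st.2.Nodup ∧ st.1 = st.2.sum ∧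
    (∀ d : Int, d ∈ st.2 ↔ ∃ i : Int, 2 ≤ i ∧ i ≤ k ∧ i ∣ n ∧ (d = i ∨ d = PySem.Int.floordiv n i))

theorem pvStepInv (n k : Int) (hk : 1 ≤ k) (st : Int × PySem.Set Int) (h : pvInv n k st) :
    pvInv n (k + 1) (pvStep n st (k + 1)) := by
  obtain ⟨hnd, hsum, hmem⟩ := h
  unfold pvStep
  by_cases hdvd : PySem.Int.mod n (k + 1) = 0
  · have hdv : (k + 1) ∣ n := (PySem.Int.mod_eq_zero_iff_dvd n (k+1)).mp hdvd
    simp only [hdvd, if_true]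
    obtain ⟨hnd1, hsum1, hmem1⟩ := pvAddStep st.2 st.1 (k+1) hnd hsum
    obtain ⟨hnd2, hsum2, hmem2⟩ := pvAddStep _ _ (PySem.Int.floordiv n (k+1)) hnd1 hsum1
    refine ⟨hnd2, hsum2, fun d => ?_⟩
    rw [hmem2, hmem1, hmem d]
    constructor
    · rintro ((⟨i, h2, hik, hidvd, hcase⟩ | rfl) | rfl)
      · exact ⟨i, h2, by omega, hidvd, hcase⟩
      · exact ⟨k+1, by omega, by omega, hdv, Or.inl rfl⟩
      · exact ⟨k+1, by omega, by omega, hdv, Or.inr rfl⟩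
    · rintro ⟨i, h2, hik, hidvd, hcase⟩
      by_cases hi : i ≤ k
      · exact Or.inl (Or.inl ⟨i, h2, hi, hidvd, hcase⟩)
      · have : i = k + 1 := by omega
        subst this
        rcases hcase with rfl | rfl
        · exact Or.inl (Or.inr rfl)
        · exact Or.inr rfl
  · rw [if_neg hdvd]
    refine ⟨hnd, hsum, fun d => ?_⟩
    rw [hmem d]
    constructor
    · rintro ⟨i, h2, hik, hidvd, hcase⟩
      exact ⟨i, h2, by omega, hidvd, hcase⟩
    · rintro ⟨i, h2, hik, hidvd, hcase⟩
      by_cases hi : i ≤ k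
      · exact ⟨i, h2, hi, hidvd, hcase⟩
      · have : i = k + 1 := by omega
        subst this
        exact absurd ((PySem.Int.mod_eq_zero_iff_dvd n (k+1)).mpr hidvd) hdvd

theorem pvLoopInv (n : Int) (j : Nat) :
    pvInv n (1 + (j : Int)) ((PySem.List.pyRange 2 (1 + (j : Int) + 1) 1).foldl (pvStep n) (0, PySem.Set.empty)) := by
  induction j with
  | zero =>
    rw [PySem.List.pyRange_one_eq_nil (by omega)]
    refine ⟨List.nodup_nil, rfl, fun d => ?_⟩
    simp only [List.foldl_nil, PySem.Set.empty, List.not_mem_nil, false_iff]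
    rintro ⟨i, h2, hik, -, -⟩
    omega
  | succ m ih =>
    have key := pvStepInv n (1 + (m:Int)) (by omega) _ ih
    have hr : PySem.List.pyRange 2 (1 + ((m:Int) + 1) + 1) 1
        = PySem.List.pyRange 2 (1 + (m:Int) + 1) 1 ++ [1 + (m:Int) + 1] := by
      rw [show (1 + ((m:Int) + 1) + 1) = (1 + (m:Int) + 1) + 1 by ring]
      exact PySem.List.pyRange_one_succ_right (by omega)
    push_cast
    rw [hr, List.foldl_append]
    simpa [show (1 + ((m:Int) + 1)) = 1 + (m:Int) + 1 by ring] using key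

-- the loop-end membership condition, transferred to Int
theorem pvBridge (N : Nat) (h4 : 4 ≤ N) (d : Int) :
    (∃ i : Int, 2 ≤ i ∧ i ≤ (N.sqrt : Int) ∧ i ∣ (N:Int) ∧ (d = i ∨ d = PySem.Int.floordiv (N:Int) i))
      ↔ (2 ≤ d ∧ d < (N:Int) ∧ d ∣ (N:Int)) := by
  constructor
  · rintro ⟨i, h2, hr, hdvd, hc⟩
    lift i to ℕ using (by omega) with I
    have hI2 : 2 ≤ I := by exact_mod_cast h2
    have hIs : I ≤ N.sqrt := by exact_mod_cast hr
    have hIdvd : I ∣ N := by exact_mod_cast hdvd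
    have hd : d = (I:Int) ∨ d = ((N / I : Nat) : Int) := by
      rcases hc with rfl | rfl
      · exact Or.inl rfl
      · right; rw [PySem.Int.floordiv_natCast]
    rcases hd with rfl | rfl
    · obtain ⟨a, b, c⟩ := (pvKeyNat N h4 I).mp ⟨I, hI2, hIs, hIdvd, Or.inl rfl⟩
      exact ⟨by exact_mod_cast a, by exact_mod_cast b, by exact_mod_cast c⟩
    · obtain ⟨a, b, c⟩ := (pvKeyNat N h4 (N / I)).mp ⟨I, hI2, hIs, hIdvd, Or.inr rfl⟩
      exact ⟨by exact_mod_cast a, by exact_mod_cast b, by exact_mod_cast c⟩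
  · rintro ⟨h2, hlt, hdvd⟩
    lift d to ℕ using (by omega) with D
    obtain ⟨I, hI2, hIs, hIdvd, hc⟩ := (pvKeyNat N h4 D).mpr
      ⟨by exact_mod_cast h2, by exact_mod_cast hlt, by exact_mod_cast hdvd⟩
    refine ⟨(I:Int), by exact_mod_cast hI2, by exact_mod_cast hIs, by exact_mod_cast hIdvd, ?_⟩
    rcases hc with rfl | hcr
    · exact Or.inl rfl
    · right; rw [PySem.Int.floordiv_natCast]; exact_mod_cast hcr

-- for num < 4 there is no divisor strictly between 1 and num
theorem pvFilterSmall (num : Int) (h0 : 0 ≤ num) (h4 : num < 4) :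
    (PySem.List.pyRange 2 num 1).filter (fun d => PySem.Int.mod num d = 0) = [] := by
  rw [List.filter_eq_nil_iff]
  intro a ha
  have hb := PySem.List.mem_pyRange_one.mp ha
  have ha2 : a = 2 ∧ num = 3 := by omega
  obtain ⟨rfl, rfl⟩ := ha2
  decide

-- for num < 4 the isqrt is at most 1
theorem pvSqrtSmall (num : Int) (h0 : 0 ≤ num) (h4 : num < 4) : (Int.toNat num).sqrt < 2 := by
  by_contra hcon
  have h22 : 2 * 2 ≤ Int.toNat num := Nat.le_sqrt.mp (by omega)
  omega

-- A's fold produces exactly B's linear divisor sum, for every nonnegative num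
theorem pvSum_eq (num : Int) (h : 0 ≤ num) :
    pvGetSumDivs num = ((PySem.List.pyRange 2 num 1).filter (fun d => PySem.Int.mod num d = 0)).sum := by
  by_cases hsmall : num < 4
  · -- num ∈ {0,1,2,3}: the √-loop range is empty and no d in [2, num) divides num
    have hs1 := pvSqrtSmall num h hsmall
    unfold pvGetSumDivs
    rw [PySem.List.pyRange_one_eq_nil (by omega), pvFilterSmall num h hsmall]
    rfl
  · obtain ⟨N, rfl⟩ : ∃ N : Nat, num = (N:Int) := ⟨num.toNat, (Int.toNat_of_nonneg h).symm⟩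
    have h4 : 4 ≤ N := by exact_mod_cast not_lt.mp hsmall
    have hr2 : 2 ≤ N.sqrt := Nat.le_sqrt.mpr (by omega)
    have hinv := pvLoopInv (N:Int) (N.sqrt - 1)
    have hc : (1 + ((N.sqrt - 1 : Nat) : Int)) = (N.sqrt : Int) := by
      have h1 : 1 ≤ N.sqrt := by omega
      push_cast [h1]
      ring
    rw [hc] at hinv
    obtain ⟨hnd, hsum, hmem⟩ := hinv
    have hndL : ((PySem.List.pyRange 2 (N:Int) 1).filter (fun d => PySem.Int.mod (N:Int) d = 0)).Nodup :=
      (PySem.List.nodup_pyRange_one 2 (N:Int) ).filter _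
    have hmemL : ∀ d : Int, d ∈ (PySem.List.pyRange 2 (N:Int) 1).filter (fun d => PySem.Int.mod (N:Int) d = 0)
        ↔ (2 ≤ d ∧ d < (N:Int) ∧ d ∣ (N:Int)) := by
      intro d
      rw [List.mem_filter, PySem.List.mem_pyRange_one]
      simp only [decide_eq_true_eq, PySem.Int.mod_eq_zero_iff_dvd]
      tauto
    have hperm : List.Perm
        ((PySem.List.pyRange 2 ((N.sqrt : Int) + 1) 1).foldl (pvStep (N:Int)) (0, PySem.Set.empty)).2
        ((PySem.List.pyRange 2 (N:Int) 1).filter (fun d => PySem.Int.mod (N:Int) d = 0)) := by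
      refine (List.perm_ext_iff_of_nodup hnd hndL).mpr (fun d => ?_)
      rw [hmem d, hmemL d]
      exact pvBridge N h4 d
    unfold pvGetSumDivs
    simp only [Int.toNat_natCast]
    rw [hsum]
    exact hperm.sum_eq

-- ===== B-side lemmas: the sigma loop computes the full divisor sum =====

-- what pvStrip does: strips all factors p, accumulating the geometric sum
theorem pvStrip_spec (p m t : Nat) (hp : 2 ≤ p) (hm : 1 ≤ m) :
    ∃ k, m = p ^ k * (pvStrip p m t).1 ∧ ¬ p ∣ (pvStrip p m t).1 ∧ 1 ≤ (pvStrip p m t).1 ∧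
      (pvStrip p m t).2 = t * p ^ k + ∑ i ∈ Finset.range k, p ^ i := by
  revert hm
  refine pvStrip.induct p (fun m t => 1 ≤ m → ∃ k, m = p ^ k * (pvStrip p m t).1 ∧
    ¬ p ∣ (pvStrip p m t).1 ∧ 1 ≤ (pvStrip p m t).1 ∧
    (pvStrip p m t).2 = t * p ^ k + ∑ i ∈ Finset.range k, p ^ i) ?_ ?_ m t
  · intro m t h ih hm
    have hdvd : p ∣ m := Nat.dvd_of_mod_eq_zero h.2.1
    have hm' : 1 ≤ m / p := (Nat.one_le_div_iff (by omega)).mpr (Nat.le_of_dvd hm hdvd)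
    obtain ⟨k, hk1, hk2, hk3, hk4⟩ := ih hm'
    rw [pvStrip, dif_pos h]
    refine ⟨k + 1, ?_, hk2, hk3, ?_⟩
    · calc m = m / p * p := (Nat.div_mul_cancel hdvd).symm
        _ = p ^ k * (pvStrip p (m / p) (t * p + 1)).1 * p := by rw [← hk1]
        _ = p ^ (k + 1) * (pvStrip p (m / p) (t * p + 1)).1 := by ring
    · rw [hk4, Finset.sum_range_succ]
      ring
  · intro m t h hm
    rw [pvStrip, dif_neg h]
    refine ⟨0, by simp, ?_, hm, by simp⟩
    intro hd
    exact h ⟨hp, Nat.mod_eq_zero_of_dvd hd, hm⟩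

-- sigma at a prime power is the geometric sum accumulated by pvStrip's term
theorem pvSigmaPP (p k : Nat) (pp : p.Prime) :
    ArithmeticFunction.sigma 1 (p ^ k) = ∑ i ∈ Finset.range (k + 1), p ^ i := by
  rw [ArithmeticFunction.sigma_one_apply, Nat.sum_divisors_prime_pow pp]

-- invariant of the outer loop: all prime factors of m are ≥ p, so the loop finishes sigma(m)
theorem pvSigLoop_eq : ∀ (m p total : Nat), 1 ≤ m → 2 ≤ p →
    (∀ q, q.Prime → q ∣ m → p ≤ q) →
    pvSigLoop m p total = total * ArithmeticFunction.sigma 1 m := by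
  refine pvSigLoop.induct (fun m p total => 1 ≤ m → 2 ≤ p → (∀ q, q.Prime → q ∣ m → p ≤ q) →
    pvSigLoop m p total = total * ArithmeticFunction.sigma 1 m) ?_ ?_ ?_ ?_
  · intro m p total h hd r ih hm hp hfac
    have hdvd : p ∣ m := Nat.dvd_of_mod_eq_zero hd
    have hpf : p.minFac = p := le_antisymm (Nat.minFac_le (by omega))
      (hfac _ (Nat.minFac_prime (by omega)) (dvd_trans (Nat.minFac_dvd p) hdvd))
    have pp : p.Prime := hpf ▸ Nat.minFac_prime (show p ≠ 1 by omega)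
    obtain ⟨k, hk1, hk2, hk3, hk4⟩ := pvStrip_spec p m 1 hp hm
    have hr1dvd : (pvStrip p m 1).1 ∣ m := Dvd.intro _ (by rw [mul_comm]; exact hk1.symm)
    have hfac' : ∀ q, q.Prime → q ∣ (pvStrip p m 1).1 → p + 1 ≤ q := by
      intro q hq hqd
      have hq1 : p ≤ q := hfac q hq (dvd_trans hqd hr1dvd)
      rcases eq_or_lt_of_le hq1 with rfl | hlt
      · exact absurd hqd hk2
      · omega
    have hcop : Nat.Coprime (p ^ k) (pvStrip p m 1).1 :=
      Nat.Coprime.pow_left k (pp.coprime_iff_not_dvd.mpr hk2)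
    have hmul : ArithmeticFunction.sigma 1 m
        = ArithmeticFunction.sigma 1 (p ^ k) * ArithmeticFunction.sigma 1 (pvStrip p m 1).1 := by
      conv_lhs => rw [hk1]
      exact (ArithmeticFunction.isMultiplicative_sigma (k := 1)).map_mul_of_coprime hcop
    rw [pvSigLoop, dif_pos h, dif_pos hd]
    have hrec : pvSigLoop (pvStrip p m 1).1 (p + 1) (total * (pvStrip p m 1).2)
        = total * (pvStrip p m 1).2 * ArithmeticFunction.sigma 1 (pvStrip p m 1).1 :=
      ih hk3 (by omega) hfac'
    show pvSigLoop (pvStrip p m 1).1 (p + 1) (total * (pvStrip p m 1).2)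
        = total * ArithmeticFunction.sigma 1 m
    rw [hrec, hmul, pvSigmaPP p k pp, hk4, Finset.sum_range_succ]
    ring
  · intro m p total h hd ih hm hp hfac
    have hfac' : ∀ q, q.Prime → q ∣ m → p + 1 ≤ q := by
      intro q hq hqd
      have hq1 : p ≤ q := hfac q hq hqd
      rcases eq_or_lt_of_le hq1 with rfl | hlt
      · exact absurd (Nat.mod_eq_zero_of_dvd hqd) hd
      · omega
    rw [pvSigLoop, dif_pos h, dif_neg hd]
    exact ih hm (by omega) hfac'
  · intro m p total h h1 hm hp hfac
    have pp : m.Prime := by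
      by_contra hnp
      have hq := Nat.minFac_prime (show m ≠ 1 by omega)
      have hle : p ≤ m.minFac := hfac _ hq (Nat.minFac_dvd m)
      have hsq : m.minFac ^ 2 ≤ m := Nat.minFac_sq_le_self (by omega) hnp
      exact h (le_trans (by nlinarith) hsq)
    rw [pvSigLoop, dif_neg h, if_pos h1, ArithmeticFunction.sigma_one_apply, pp.divisors]
    rw [Finset.sum_insert (by simp; omega), Finset.sum_singleton]
    ring
  · intro m p total h h1 hm hp hfac
    have hm1 : m = 1 := by omega
    subst hm1
    rw [pvSigLoop, dif_neg h, if_neg (by omega), ArithmeticFunction.sigma_one_apply,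
      Nat.divisors_one, Finset.sum_singleton, mul_one]

theorem pvSigma_divisors (n : Nat) (h : 1 ≤ n) :
    pvSigLoop n 2 1 = ∑ d ∈ n.divisors, d := by
  rw [pvSigLoop_eq n 2 1 h (le_refl 2) (fun q hq _ => hq.two_le), one_mul,
    ArithmeticFunction.sigma_one_apply]

-- A's linear divisor sum in terms of the full divisor sum, for n ≥ 2
theorem pvLin_eq_sigma (N : Nat) (h2 : 2 ≤ N) :
    ((PySem.List.pyRange 2 (N:Int) 1).filter (fun d => PySem.Int.mod (N:Int) d = 0)).sum
      = ((∑ d ∈ N.divisors, d : Nat) : Int) - 1 - (N:Int) := by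
  set D : Finset ℕ := (N.divisors.erase N).erase 1 with hD
  have hmemD : ∀ d : ℕ, d ∈ D ↔ (2 ≤ d ∧ d < N ∧ d ∣ N) := by
    intro d
    simp only [hD, Finset.mem_erase, Nat.mem_divisors]
    constructor
    · rintro ⟨hne1, hneN, hdvd, -⟩
      have h0 : 0 < d := Nat.pos_of_dvd_of_pos hdvd (by omega)
      have hle : d ≤ N := Nat.le_of_dvd (by omega) hdvd
      exact ⟨by omega, by omega, hdvd⟩
    · rintro ⟨ha, hb, hc⟩
      exact ⟨by omega, by omega, hc, by omega⟩
  have hndS : ((PySem.List.pyRange 2 (N:Int) 1).filter (fun d => PySem.Int.mod (N:Int) d = 0)).Nodup :=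
    (PySem.List.nodup_pyRange_one 2 (N:Int)).filter _
  have hmemS : ∀ d : Int, d ∈ (PySem.List.pyRange 2 (N:Int) 1).filter (fun d => PySem.Int.mod (N:Int) d = 0)
      ↔ (2 ≤ d ∧ d < (N:Int) ∧ d ∣ (N:Int)) := by
    intro d
    rw [List.mem_filter, PySem.List.mem_pyRange_one]
    simp only [decide_eq_true_eq, PySem.Int.mod_eq_zero_iff_dvd]
    tauto
  have hperm : ((PySem.List.pyRange 2 (N:Int) 1).filter (fun d => PySem.Int.mod (N:Int) d = 0)).Perm
      (D.toList.map (Nat.cast : ℕ → ℤ)) := by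
    refine (List.perm_ext_iff_of_nodup hndS (D.nodup_toList.map Nat.cast_injective)).mpr ?_
    intro x
    rw [hmemS x, List.mem_map]
    constructor
    · rintro ⟨ha, hb, hc⟩
      refine ⟨x.toNat, ?_, by omega⟩
      rw [Finset.mem_toList, hmemD]
      have hx : ((x.toNat : ℕ) : ℤ) = x := by omega
      refine ⟨by omega, by omega, ?_⟩
      exact_mod_cast hx ▸ hc
    · rintro ⟨d, hd, rfl⟩
      rw [Finset.mem_toList, hmemD] at hd
      exact ⟨by exact_mod_cast hd.1, by exact_mod_cast hd.2.1, by exact_mod_cast hd.2.2⟩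
  rw [hperm.sum_eq, Finset.sum_map_toList]
  have e1 : ∑ d ∈ N.divisors, d = N + ∑ d ∈ N.divisors.erase N, d :=
    (Finset.add_sum_erase _ _ (Nat.mem_divisors_self N (by omega))).symm
  have e2 : ∑ d ∈ N.divisors.erase N, d = 1 + ∑ d ∈ D, d := by
    refine (Finset.add_sum_erase _ _ ?_).symm
    exact Finset.mem_erase.mpr ⟨by omega, Nat.one_mem_divisors.mpr (by omega)⟩
  have e3 : ∑ d ∈ D, ((d : ℕ) : ℤ) = ((∑ d ∈ D, d : ℕ) : ℤ) := by push_cast; rfl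
  rw [e3, e1, e2]
  push_cast
  ring

theorem pvGood_eq (num : Int) (h : 0 ≤ num) :
    (decide (pvGetSumDivs num > num)) = pvIsGood num := by
  unfold pvIsGood pvSigmaAlt
  by_cases hsmall : num < 4
  · have hsig : pvSigLoop (Int.toNat num) 2 1
        = if 1 < Int.toNat num then Int.toNat num + 1 else 1 := by
      rw [pvSigLoop, dif_neg (by omega)]
      split_ifs with h1
      · rw [one_mul]
      · rfl
    rw [pvSum_eq num h, pvFilterSmall num h hsmall, hsig]
    rw [← Bool.decide_and]
    rw [decide_eq_decide]
    simp only [List.sum_nil]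
    split_ifs with h1 <;> [skip; skip] <;> constructor <;> intro hh <;> push_cast at hh ⊢ <;> omega
  · obtain ⟨N, rfl⟩ : ∃ M : Nat, num = (M:Int) := ⟨num.toNat, (Int.toNat_of_nonneg h).symm⟩
    have h4 : 4 ≤ N := by exact_mod_cast not_lt.mp hsmall
    rw [pvSum_eq _ h, pvLin_eq_sigma N (by omega)]
    rw [show Int.toNat ((N : ℕ) : ℤ) = N from Int.toNat_natCast N,
      pvSigma_divisors N (by omega)]
    rw [← Bool.decide_and, decide_eq_decide]
    constructor <;> intro hh <;> [exact ⟨by exact_mod_cast Nat.one_le_iff_ne_zero.mpr (by omega), by omega⟩; omega]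

-- ===== VERDICT (by name: the statement is the Claim_ definition above) =====
theorem det_first_last_good_numbers_spec : Claim_equal_det_first_last_good_numbers := by
  intro low high _ hpre
  unfold Spec_det_first_last_good_numbers det_first_last_good_numbers det_first_last_good_numbers_alt
  rcases hpre with hlow | hempty
  · -- 0 ≤ low: every scanned num is ≥ 0, so the two goodness tests agree on both ranges
    have hup : (PySem.List.pyRange low (high + 1) 1).find? (fun num => decide (pvGetSumDivs num > num))
        = (PySem.List.pyRange low (high + 1) 1).find? pvIsGood := by
      apply pvFind?_congr
      intro x hx
      have := (PySem.List.mem_pyRange_one).mp hx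
      exact pvGood_eq x (by omega)
    have hdown : (PySem.List.pyRange high (low - 1) (-1)).find? (fun num => decide (pvGetSumDivs num > num))
        = (PySem.List.pyRange high (low - 1) (-1)).find? pvIsGood := by
      apply pvFind?_congr
      intro x hx
      have := (PySem.List.mem_pyRange_neg_one).mp hx
      exact pvGood_eq x (by omega)
    rw [hup, hdown]
    have hneg : PySem.Int.toStr (-1) = "-1" := by decide
    cases hfst : (PySem.List.pyRange low (high + 1) 1).find? pvIsGood with
    | none => simp [hneg]
    | some first =>
      have hmem := List.find?_some hfst
      have hmemr := List.mem_of_find?_eq_some hfst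
      have hbounds := (PySem.List.mem_pyRange_one).mp hmemr
      have hne : (first != -1) = true := by simp; omega
      simp only [hne, if_true]
      cases hsnd : (PySem.List.pyRange high (low - 1) (-1)).find? pvIsGood with
      | none =>
        -- impossible: first itself lies in the downward range and is good
        exfalso
        have := List.find?_eq_none.mp hsnd first
          ((PySem.List.mem_pyRange_neg_one).mpr (by omega))
        simp [hmem] at this
      | some last => simp
  · -- high < low: both ranges are empty, both sides return ["-1", "-1"]
    rw [PySem.List.pyRange_one_eq_nil (by omega), PySem.List.pyRange_neg_one_eq_nil (by omega)]
    have hneg : PySem.Int.toStr (-1) = "-1" := by decide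
    simp [hneg]
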